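-- pv_equiv track=rewrite | github.com/Alonsojc/jacaranda | app/models/usuario.py | permisos_default_por_rol
-- ===== SOURCE A (Python) =====
-- import enum
--
-- class RolUsuario(str, enum.Enum):
--     ADMINISTRADOR = "administrador"
--     GERENTE = "gerente"
--     CAJERO = "cajero"
--     PANADERO = "panadero"
--     ALMACENISTA = "almacenista"
--     CONTADOR = "contador"
--
-- MODULOS_DISPONIBLES = [
--     "dash", "pos", "ped", "inv", "corte", "rep", "listas", "prod", "conta",
--     "iapg", "cofepris", "compras", "sucursales", "merma", "calidad", "crm",
--     "kpis", "fiscal", "auditoria", "ejecutivo", "deliveryp", "papelera",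
--     "usuarios",
-- ]
--
-- def permisos_default_por_rol(rol: RolUsuario) -> dict:
--     """Permisos base por rol. Valores explícitos del usuario siempre ganan."""
--     if rol == RolUsuario.ADMINISTRADOR:
--         return {m: "editar" for m in MODULOS_DISPONIBLES}
--     elif rol in (RolUsuario.GERENTE,):
--         ocultos = {"usuarios", "conta", "fiscal", "auditoria"}
--         return {m: "editar" for m in MODULOS_DISPONIBLES if m not in ocultos}
--     elif rol == RolUsuario.CAJERO:
--         return {
--             "dash": "ver", "pos": "editar", "ped": "editar",
--             "corte": "ver", "listas": "ver",
--         }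
--     elif rol == RolUsuario.CONTADOR:
--         return {
--             "dash": "ver", "rep": "editar", "corte": "ver",
--             "compras": "ver", "conta": "editar",
--             "fiscal": "editar", "kpis": "ver",
--         }
--     elif rol == RolUsuario.PANADERO:
--         return {
--             "dash": "ver", "inv": "editar", "ped": "ver",
--             "prod": "editar", "merma": "editar", "calidad": "editar",
--         }
--     elif rol == RolUsuario.ALMACENISTA:
--         return {
--             "dash": "ver", "inv": "editar", "listas": "ver",
--             "compras": "ver", "sucursales": "ver", "merma": "editar",
--             "calidad": "editar",
--         }
--     return {"dash": "ver", "pos": "ver"}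
-- ===== SOURCE B (Python) =====
-- import enum
--
-- class RolUsuario(str, enum.Enum):
--     ADMINISTRADOR = "administrador"
--     GERENTE = "gerente"
--     CAJERO = "cajero"
--     PANADERO = "panadero"
--     ALMACENISTA = "almacenista"
--     CONTADOR = "contador"
--
-- MODULOS_DISPONIBLES = [
--     "dash", "pos", "ped", "inv", "corte", "rep", "listas", "prod", "conta",
--     "iapg", "cofepris", "compras", "sucursales", "merma", "calidad", "crm",
--     "kpis", "fiscal", "auditoria", "ejecutivo", "deliveryp", "papelera",
--     "usuarios",
-- ]
--
-- def permisos_default_por_rol(rol: RolUsuario) -> dict: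
--     """Permisos base por rol, derivados de una tabla plana de reglas (rol, modulo, permiso)."""
--     ocultos = ("usuarios", "conta", "fiscal", "auditoria")
--     reglas = []
--     for m in MODULOS_DISPONIBLES:
--         reglas.append((RolUsuario.ADMINISTRADOR, m, "editar"))
--     for m in MODULOS_DISPONIBLES:
--         if m not in ocultos:
--             reglas.append((RolUsuario.GERENTE, m, "editar"))
--     reglas += [
--         (RolUsuario.CAJERO, "dash", "ver"),
--         (RolUsuario.CAJERO, "pos", "editar"),
--         (RolUsuario.CAJERO, "ped", "editar"),
--         (RolUsuario.CAJERO, "corte", "ver"),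
--         (RolUsuario.CAJERO, "listas", "ver"),
--         (RolUsuario.CONTADOR, "dash", "ver"),
--         (RolUsuario.CONTADOR, "rep", "editar"),
--         (RolUsuario.CONTADOR, "corte", "ver"),
--         (RolUsuario.CONTADOR, "compras", "ver"),
--         (RolUsuario.CONTADOR, "conta", "editar"),
--         (RolUsuario.CONTADOR, "fiscal", "editar"),
--         (RolUsuario.CONTADOR, "kpis", "ver"),
--         (RolUsuario.PANADERO, "dash", "ver"),
--         (RolUsuario.PANADERO, "inv", "editar"),
--         (RolUsuario.PANADERO, "ped", "ver"),
--         (RolUsuario.PANADERO, "prod", "editar"),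
--         (RolUsuario.PANADERO, "merma", "editar"),
--         (RolUsuario.PANADERO, "calidad", "editar"),
--         (RolUsuario.ALMACENISTA, "dash", "ver"),
--         (RolUsuario.ALMACENISTA, "inv", "editar"),
--         (RolUsuario.ALMACENISTA, "listas", "ver"),
--         (RolUsuario.ALMACENISTA, "compras", "ver"),
--         (RolUsuario.ALMACENISTA, "sucursales", "ver"),
--         (RolUsuario.ALMACENISTA, "merma", "editar"),
--         (RolUsuario.ALMACENISTA, "calidad", "editar"),
--     ]
--     permisos = {m: p for r, m, p in reglas if r == rol}
--     return permisos if permisos else {"dash": "ver", "pos": "ver"}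
-- ===== Notes on version B (the rewrite author's own statement) =====
-- stated objective: alternative
-- what changed: B derives each role's permissions from one flat rule table of (role, module, permission) triples, filtered in a single pass with a dict comprehension and an emptiness-checked default, instead of A's if/elif chain returning per-role literal dicts.
import Mathlib
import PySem

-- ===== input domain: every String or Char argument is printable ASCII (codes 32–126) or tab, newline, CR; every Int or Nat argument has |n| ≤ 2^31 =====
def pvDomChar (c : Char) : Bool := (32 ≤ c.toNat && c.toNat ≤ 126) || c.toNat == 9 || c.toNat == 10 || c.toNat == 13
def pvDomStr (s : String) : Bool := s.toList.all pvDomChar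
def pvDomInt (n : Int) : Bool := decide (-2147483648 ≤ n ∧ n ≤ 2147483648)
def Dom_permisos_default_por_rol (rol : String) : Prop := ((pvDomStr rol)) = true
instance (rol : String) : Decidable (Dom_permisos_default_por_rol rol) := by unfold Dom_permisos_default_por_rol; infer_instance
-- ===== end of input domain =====

-- B derives the permissions from one flat (role, module, permission) rule table filtered in a single pass, instead of A's if/elif chain of literal dicts. Objective: alternative.

-- ===== PORT A =====
def pvModulos : List String := ["dash","pos","ped","inv","corte","rep","listas","prod","conta","iapg","cofepris","compras","sucursales","merma","calidad","crm","kpis","fiscal","auditoria","ejecutivo","deliveryp","papelera","usuarios"]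

def permisos_default_por_rol (rol : String) : List (String × String) :=
  if rol = "administrador" then pvModulos.map (fun m => (m, "editar"))
  else if rol = "gerente" then
    let ocultos : PySem.Set String := PySem.Set.ofList ["usuarios","conta","fiscal","auditoria"]
    (pvModulos.filter (fun m => !(PySem.Set.contains ocultos m))).map (fun m => (m, "editar"))
  else if rol = "cajero" then [("dash","ver"),("pos","editar"),("ped","editar"),("corte","ver"),("listas","ver")]
  else if rol = "contador" then [("dash","ver"),("rep","editar"),("corte","ver"),("compras","ver"),("conta","editar"),("fiscal","editar"),("kpis","ver")]
  else if rol = "panadero" then [("dash","ver"),("inv","editar"),("ped","ver"),("prod","editar"),("merma","editar"),("calidad","editar")]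
  else if rol = "almacenista" then [("dash","ver"),("inv","editar"),("listas","ver"),("compras","ver"),("sucursales","ver"),("merma","editar"),("calidad","editar")]
  else [("dash","ver"),("pos","ver")]

-- ===== PORT B =====
-- the flat rule table Source B builds: two loops over MODULOS plus the literal triples
def pvReglas : List (String × String × String) :=
  pvModulos.map (fun m => ("administrador", m, "editar"))
  ++ (pvModulos.filter (fun m => !(["usuarios","conta","fiscal","auditoria"].contains m))).map
       (fun m => ("gerente", m, "editar"))
  ++ [ ("cajero","dash","ver"), ("cajero","pos","editar"), ("cajero","ped","editar"),
       ("cajero","corte","ver"), ("cajero","listas","ver"),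
       ("contador","dash","ver"), ("contador","rep","editar"), ("contador","corte","ver"),
       ("contador","compras","ver"), ("contador","conta","editar"), ("contador","fiscal","editar"),
       ("contador","kpis","ver"),
       ("panadero","dash","ver"), ("panadero","inv","editar"), ("panadero","ped","ver"),
       ("panadero","prod","editar"), ("panadero","merma","editar"), ("panadero","calidad","editar"),
       ("almacenista","dash","ver"), ("almacenista","inv","editar"), ("almacenista","listas","ver"),
       ("almacenista","compras","ver"), ("almacenista","sucursales","ver"),
       ("almacenista","merma","editar"), ("almacenista","calidad","editar") ]

def permisos_default_por_rol_alt (rol : String) : List (String × String) :=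
  let permisos : PySem.Dict String String :=
    PySem.Dict.ofList ((pvReglas.filter (fun t => t.1 == rol)).map (fun t => t.2))
  if permisos.items = [] then [("dash","ver"),("pos","ver")] else permisos.items

-- ===== PRECONDITION & SPEC =====
def Spec_permisos_default_por_rol (rol : String) (out : List (String × String)) : Prop := out = permisos_default_por_rol_alt rol
instance (rol : String) (out : List (String × String)) : Decidable (Spec_permisos_default_por_rol rol out) := by unfold Spec_permisos_default_por_rol; infer_instance

-- ===== CLAIM =====
def Claim_equal_permisos_default_por_rol : Prop := ∀ (rol : String), Dom_permisos_default_por_rol rol → Spec_permisos_default_por_rol rol (permisos_default_por_rol rol)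

-- ===== LEMMAS AND PROOFS =====

set_option maxRecDepth 4000 in
-- ===== VERDICT =====
theorem permisos_default_por_rol_spec : Claim_equal_permisos_default_por_rol := by
  intro rol _
  unfold Spec_permisos_default_por_rol
  by_cases h1 : rol = "administrador"
  · subst h1; rfl
  · by_cases h2 : rol = "gerente"
    · subst h2; rfl
    · by_cases h3 : rol = "cajero"
      · subst h3; rfl
      · by_cases h4 : rol = "contador"
        · subst h4; rfl
        · by_cases h5 : rol = "panadero"
          · subst h5; rfl
          · by_cases h6 : rol = "almacenista"
            · subst h6; rfl
            · simp [permisos_default_por_rol, permisos_default_por_rol_alt, pvReglas, pvModulos,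
                    List.filter, PySem.Dict.ofList, PySem.Dict.empty, PySem.Dict.update,
                    beq_eq_false_iff_ne.mpr (Ne.symm h1), beq_eq_false_iff_ne.mpr (Ne.symm h2),
                    beq_eq_false_iff_ne.mpr (Ne.symm h3), beq_eq_false_iff_ne.mpr (Ne.symm h4),
                    beq_eq_false_iff_ne.mpr (Ne.symm h5), beq_eq_false_iff_ne.mpr (Ne.symm h6),
                    h1, h2, h3, h4, h5, h6]
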